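-- pv_equiv track=rewrite | github.com/Bhagyavanth/Sorting_Algorithms_Visualizer- | sorting_algorithm_project/mergeSort_algo.py | getColorArray
-- ===== SOURCE A (Python) =====
-- def getColorArray(length,left,middle,right):
--     colorArray=[]
--
--     for i in range(length):
--         if i>=left and i<=right:
--             if i>=left and i<=middle:
--                 colorArray.append('yellow')
--             else:
--                 colorArray.append('pink')
--         else:
--             colorArray.append('white')
--     return colorArray
-- ===== SOURCE B (Python) =====
-- def getColorArray(length, left, middle, right):
--     n = max(length, 0)
--     arr = ['white'] * n
--     ylo = max(0, left)
--     yhi = min(middle, right, n - 1)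
--     if yhi >= ylo:
--         arr[ylo:yhi + 1] = ['yellow'] * (yhi + 1 - ylo)
--     plo = max(0, left, middle + 1)
--     phi = min(right, n - 1)
--     if phi >= plo:
--         arr[plo:phi + 1] = ['pink'] * (phi + 1 - plo)
--     return arr
-- ===== Notes on version B (the rewrite author's own statement) =====
-- stated objective: faster
-- what changed: Replaces the per-index loop with its three-way branch by a base ['white']*n array plus two clamped slice-assignment paints (yellow then pink).
import Mathlib
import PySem

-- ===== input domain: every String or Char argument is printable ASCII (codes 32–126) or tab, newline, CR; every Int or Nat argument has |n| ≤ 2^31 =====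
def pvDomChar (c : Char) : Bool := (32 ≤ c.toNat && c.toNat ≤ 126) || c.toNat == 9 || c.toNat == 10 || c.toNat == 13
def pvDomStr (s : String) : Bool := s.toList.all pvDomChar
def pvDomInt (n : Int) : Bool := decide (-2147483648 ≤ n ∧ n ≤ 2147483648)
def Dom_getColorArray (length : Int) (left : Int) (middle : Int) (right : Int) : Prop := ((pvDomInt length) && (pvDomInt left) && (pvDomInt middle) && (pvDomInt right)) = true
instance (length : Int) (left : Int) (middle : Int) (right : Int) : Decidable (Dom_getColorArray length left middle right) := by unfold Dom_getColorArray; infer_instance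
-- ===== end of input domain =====

-- B replaces A's per-index three-way branch loop by a base 'white' array plus two
-- clamped slice-assignment paints (measured faster by a constant factor in Python).

-- ===== PORT A =====
def getColorArray (length : Int) (left : Int) (middle : Int) (right : Int) : List String :=
  (PySem.List.pyRange 0 length 1).foldl
    (fun colorArray i =>
      if left ≤ i ∧ i ≤ right then
        if left ≤ i ∧ i ≤ middle then colorArray ++ ["yellow"]
        else colorArray ++ ["pink"]
      else colorArray ++ ["white"]) []

-- ===== PORT B =====
-- slice assignment arr[lo:hi+1] = [c]*(hi+1-lo); exact for 0 ≤ lo ≤ hi < arr.length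
def pvPaint (arr : List String) (lo hi : Nat) (c : String) : List String :=
  arr.take lo ++ List.replicate (hi + 1 - lo) c ++ arr.drop (hi + 1)

def getColorArray_alt (length : Int) (left : Int) (middle : Int) (right : Int) : List String :=
  let n : Nat := length.toNat
  let arr0 := List.replicate n "white"
  let ylo := max 0 left
  let yhi := min middle (min right ((n : Int) - 1))
  let arr1 := if ylo ≤ yhi then pvPaint arr0 ylo.toNat yhi.toNat "yellow" else arr0
  let plo := max (max 0 left) (middle + 1)
  let phi := min right ((n : Int) - 1)
  if plo ≤ phi then pvPaint arr1 plo.toNat phi.toNat "pink" else arr1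

-- ===== PRECONDITION & SPEC =====
def Spec_getColorArray (length : Int) (left : Int) (middle : Int) (right : Int) (out : List String) : Prop := out = getColorArray_alt length left middle right
instance (length : Int) (left : Int) (middle : Int) (right : Int) (out : List String) : Decidable (Spec_getColorArray length left middle right out) := by unfold Spec_getColorArray; infer_instance

-- ===== CLAIM (what is proved, stated in full; the proofs are below) =====
def Claim_equal_getColorArray : Prop := ∀ (length : Int) (left : Int) (middle : Int) (right : Int), Dom_getColorArray length left middle right → Spec_getColorArray length left middle right (getColorArray length left middle right)

-- ===== LEMMAS AND PROOFS =====

theorem length_pvPaint (arr : List String) (lo hi : Nat) (c : String)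
    (hhi : hi < arr.length) (hle : lo ≤ hi) :
    (pvPaint arr lo hi c).length = arr.length := by
  simp [pvPaint]
  omega

theorem getElem?_pvPaint (arr : List String) (lo hi : Nat) (c : String)
    (hhi : hi < arr.length) (hle : lo ≤ hi) (i : Nat) :
    (pvPaint arr lo hi c)[i]? = if lo ≤ i ∧ i ≤ hi then some c else arr[i]? := by
  unfold pvPaint
  simp only [List.getElem?_append, List.length_append, List.length_take, List.length_replicate,
    List.getElem?_take, List.getElem?_replicate, List.getElem?_drop]
  split_ifs <;> try omega
  all_goals try rfl
  all_goals (congr 1; omega)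

theorem getColorArray_A_eq_map (length left middle right : Int) :
    getColorArray length left middle right =
      (PySem.List.pyRange 0 length 1).map (fun i =>
        if left ≤ i ∧ i ≤ right then
          if left ≤ i ∧ i ≤ middle then "yellow" else "pink"
        else "white") := by
  unfold getColorArray
  have hfun : (fun (colorArray : List String) (i : Int) =>
      if left ≤ i ∧ i ≤ right then
        if left ≤ i ∧ i ≤ middle then colorArray ++ ["yellow"]
        else colorArray ++ ["pink"]
      else colorArray ++ ["white"]) =
      (fun (colorArray : List String) (i : Int) => colorArray ++
        [if left ≤ i ∧ i ≤ right then
          if left ≤ i ∧ i ≤ middle then "yellow" else "pink"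
        else "white"]) := by
    funext acc i
    split_ifs <;> rfl
  rw [hfun, PySem.List.foldl_append_singleton_eq_map, List.nil_append]

theorem length_alt (length left middle right : Int) :
    (getColorArray_alt length left middle right).length = length.toNat := by
  unfold getColorArray_alt
  simp only []
  by_cases hy : max 0 left ≤ min middle (min right ((length.toNat : Int) - 1))
  · rw [if_pos hy]
    by_cases hp : max (max 0 left) (middle + 1) ≤ min right ((length.toNat : Int) - 1)
    · rw [if_pos hp, length_pvPaint, length_pvPaint] <;>
        (try rw [length_pvPaint]) <;> simp <;> omega
    · rw [if_neg hp, length_pvPaint] <;> simp <;> omega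
  · rw [if_neg hy]
    by_cases hp : max (max 0 left) (middle + 1) ≤ min right ((length.toNat : Int) - 1)
    · rw [if_pos hp, length_pvPaint] <;> simp <;> omega
    · rw [if_neg hp]
      simp

theorem getElem?_alt (length left middle right : Int) (i : Nat) (h : i < length.toNat) :
    (getColorArray_alt length left middle right)[i]? =
      some (if left ≤ (i : Int) ∧ (i : Int) ≤ right then
          if left ≤ (i : Int) ∧ (i : Int) ≤ middle then "yellow" else "pink"
        else "white") := by
  unfold getColorArray_alt
  simp only []
  by_cases hp : max (max 0 left) (middle + 1) ≤ min right ((length.toNat : Int) - 1)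
  · rw [if_pos hp]
    rw [getElem?_pvPaint _ _ _ _
      (by by_cases hy : max 0 left ≤ min middle (min right ((length.toNat : Int) - 1))
          · rw [if_pos hy, length_pvPaint] <;> simp <;> omega
          · rw [if_neg hy]; simp; omega)
      (by omega)]
    by_cases hin : (max (max 0 left) (middle + 1)).toNat ≤ i ∧
        i ≤ (min right ((length.toNat : Int) - 1)).toNat
    · rw [if_pos hin]
      have h1 : left ≤ (i:Int) := by omega
      have h2 : ¬ ((i:Int) ≤ middle) := by omega
      have h3 : (i:Int) ≤ right := by omega
      simp [h1, h2, h3]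
    · rw [if_neg hin]
      by_cases hy : max 0 left ≤ min middle (min right ((length.toNat : Int) - 1))
      · rw [if_pos hy]
        rw [getElem?_pvPaint _ _ _ _ (by simp; omega) (by omega)]
        by_cases hyi : (max 0 left).toNat ≤ i ∧
            i ≤ (min middle (min right ((length.toNat : Int) - 1))).toNat
        · rw [if_pos hyi]
          have h1 : left ≤ (i:Int) := by omega
          have h2 : (i:Int) ≤ middle := by omega
          have h3 : (i:Int) ≤ right := by omega
          simp [h1, h2, h3]
        · rw [if_neg hyi]
          rw [List.getElem?_replicate, if_pos h]
          have hno : ¬ (left ≤ (i:Int) ∧ (i:Int) ≤ right) := by omega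
          simp [hno]
      · rw [if_neg hy]
        rw [List.getElem?_replicate, if_pos h]
        have hno : ¬ (left ≤ (i:Int) ∧ (i:Int) ≤ right) := by omega
        simp [hno]
  · rw [if_neg hp]
    by_cases hy : max 0 left ≤ min middle (min right ((length.toNat : Int) - 1))
    · rw [if_pos hy]
      rw [getElem?_pvPaint _ _ _ _ (by simp; omega) (by omega)]
      by_cases hyi : (max 0 left).toNat ≤ i ∧
          i ≤ (min middle (min right ((length.toNat : Int) - 1))).toNat
      · rw [if_pos hyi]
        have h1 : left ≤ (i:Int) := by omega
        have h2 : (i:Int) ≤ middle := by omega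
        have h3 : (i:Int) ≤ right := by omega
        simp [h1, h2, h3]
      · rw [if_neg hyi]
        rw [List.getElem?_replicate, if_pos h]
        have hcase : (if left ≤ (i:Int) ∧ (i:Int) ≤ right then
              if left ≤ (i:Int) ∧ (i:Int) ≤ middle then "yellow" else "pink"
            else "white") = "white" := by
          split_ifs with c1 c2 <;> first | rfl | omega
        rw [hcase]
    · rw [if_neg hy]
      rw [List.getElem?_replicate, if_pos h]
      have hcase : (if left ≤ (i:Int) ∧ (i:Int) ≤ right then
            if left ≤ (i:Int) ∧ (i:Int) ≤ middle then "yellow" else "pink"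
          else "white") = "white" := by
        split_ifs with c1 c2 <;> first | rfl | omega
      rw [hcase]

-- ===== VERDICT (by name: the statement is the Claim_ definition above) =====
theorem getColorArray_spec : Claim_equal_getColorArray := by
  intro length left middle right _
  unfold Spec_getColorArray
  apply List.ext_getElem?
  intro i
  rw [getColorArray_A_eq_map, PySem.List.pyRange_one, List.map_map]
  by_cases h : i < length.toNat
  · rw [getElem?_alt length left middle right i h]
    rw [List.getElem?_map, List.getElem?_range (by omega : i < (length - 0).toNat)]
    simp
  · rw [List.getElem?_eq_none, List.getElem?_eq_none]
    · rw [length_alt]; omega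
    · simp; omega
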